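-- pv_equiv track=rewrite | github.com/innovationcode/coding-challenge | Solution.py | get_days_of_power
-- ===== SOURCE A (Python) =====
-- def get_days_of_power(R1, D1, R2, D2, R3, D3, K):
--
--       if D1 + D2 + D3 == 0:
--             return 0
--
--       if R1 < 0 or R2 < 0 or R3 < 0:
--             return -1
--
--       if D1 < 0 or D2 < 0 or D3 < 0:
--             return -1
--
--       day = 0
--       pending = K
--       total_rate = 0
--       number_of_power_day = 0
--       d1_added = False
--       d2_added = False
--       d3_added = False
--
--       while pending > 0:
--             day += 1
--             if D1 <= day and not d1_added:
--                   total_rate += R1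
--                   d1_added = True
--             if D2 <= day and not d2_added:
--                   total_rate += R2
--                   d2_added = True
--             if D3 <= day and not d3_added:
--                   total_rate += R3
--                   d3_added = True
--             if total_rate == 0:
--                   continue
--             else:
--                   pending = pending - total_rate
--                   if pending >= 0:
--                         number_of_power_day += 1
--
--       return number_of_power_day
-- ===== SOURCE B (Python) =====
-- def get_days_of_power(R1, D1, R2, D2, R3, D3, K):
--     if D1 + D2 + D3 == 0:
--         return 0
--     if R1 < 0 or R2 < 0 or R3 < 0 or D1 < 0 or D2 < 0 or D3 < 0:
--         return -1
--     if K <= 0: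
--         return 0
--     b1, b2, b3 = max(D1, 1), max(D2, 1), max(D3, 1)
--     lo = min(b1, b2, b3)
--     hi = max(b1, b2, b3)
--     mid = b1 + b2 + b3 - lo - hi
--
--     def rate(d):
--         return (R1 if b1 <= d else 0) + (R2 if b2 <= d else 0) + (R3 if b3 <= d else 0)
--
--     pending = K
--     count = 0
--     d = lo
--     for nxt in (mid, hi):
--         r = rate(d)
--         if r > 0:
--             span = r * (nxt - d)
--             if pending <= span:
--                 return count + pending // r
--             pending -= span
--             count += nxt - d
--         d = nxt
--     return count + pending // rate(d)
-- ===== Notes on version B (the rewrite author's own statement) =====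
-- stated objective: faster
-- what changed: B replaces A's day-by-day simulation of the depletion loop by O(1) closed-form arithmetic over the three sorted rate-activation breakpoints (min/median/max of max(Di,1)), using one floor division per segment.
-- outside the precondition, e.g. on get_days_of_power(0, 1, 0, 1, 0, 1, 5): A does not finish within the time limit, B raises ZeroDivisionError
import Mathlib
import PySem

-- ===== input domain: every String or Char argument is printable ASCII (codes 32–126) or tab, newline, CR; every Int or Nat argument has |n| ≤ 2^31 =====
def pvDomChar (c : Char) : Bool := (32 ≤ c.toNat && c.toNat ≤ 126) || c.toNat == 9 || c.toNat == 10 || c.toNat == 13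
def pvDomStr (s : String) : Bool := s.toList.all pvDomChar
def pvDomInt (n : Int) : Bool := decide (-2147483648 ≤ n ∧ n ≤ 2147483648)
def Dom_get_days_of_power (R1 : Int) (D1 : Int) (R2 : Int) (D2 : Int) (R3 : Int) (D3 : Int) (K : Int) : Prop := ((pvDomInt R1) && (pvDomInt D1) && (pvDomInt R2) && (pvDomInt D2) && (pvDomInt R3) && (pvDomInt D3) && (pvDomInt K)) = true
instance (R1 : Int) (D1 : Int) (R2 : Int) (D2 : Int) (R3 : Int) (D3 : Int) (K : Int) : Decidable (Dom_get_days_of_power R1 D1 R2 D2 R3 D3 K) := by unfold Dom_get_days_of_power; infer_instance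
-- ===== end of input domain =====

-- B replaces A's day-by-day simulation by O(1) closed-form arithmetic over the three
-- sorted rate-activation breakpoints (objective: faster, asymptotically).


-- ===== PORT A =====
-- one `if Di <= day and not di_added: total_rate += Ri; di_added = True` block,
-- returning the updated (total_rate, di_added) pair
def stepAdd (cond : Prop) [Decidable cond] (R total : Int) (a : Bool) : Int × Bool :=
  if cond ∧ a = false then (total + R, true) else (total, a)

-- the while loop; `fuel` is only a totality guard: within Pre_ the loop terminates in
-- at most max(D1,D2,D3,1)+K iterations, which the caller's fuel exceeds
def loopA (D1 R1 D2 R2 D3 R3 : Int) : Nat → Int → Int → Int → Int → Bool → Bool → Bool → Int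
  | 0, _, _, _, count, _, _, _ => count
  | (fuel+1), day, pending, total, count, a1, a2, a3 =>
    if pending > 0 then
      let day1 := day + 1
      let t1 := stepAdd (D1 ≤ day1) R1 total a1
      let t2 := stepAdd (D2 ≤ day1) R2 t1.1 a2
      let t3 := stepAdd (D3 ≤ day1) R3 t2.1 a3
      if t3.1 = 0 then
        loopA D1 R1 D2 R2 D3 R3 fuel day1 pending t3.1 count t1.2 t2.2 t3.2
      else
        let pending1 := pending - t3.1
        let count1 := if pending1 ≥ 0 then count + 1 else count
        loopA D1 R1 D2 R2 D3 R3 fuel day1 pending1 t3.1 count1 t1.2 t2.2 t3.2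
    else count

def get_days_of_power (R1 : Int) (D1 : Int) (R2 : Int) (D2 : Int) (R3 : Int) (D3 : Int) (K : Int) : Int :=
  if D1 + D2 + D3 = 0 then 0
  else if R1 < 0 ∨ R2 < 0 ∨ R3 < 0 then -1
  else if D1 < 0 ∨ D2 < 0 ∨ D3 < 0 then -1
  else loopA D1 R1 D2 R2 D3 R3 ((max D1 (max D2 (max D3 1)) + K).toNat + 1) 0 K 0 0 false false false

-- ===== PORT B =====
-- Source B's `rate(d)`
def rateB (R1 R2 R3 b1 b2 b3 d : Int) : Int :=
  (if b1 ≤ d then R1 else 0) + (if b2 ≤ d then R2 else 0) + (if b3 ≤ d then R3 else 0)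

-- one iteration of Source B's `for nxt in (mid, hi)` loop: `inl res` = early return,
-- `inr st` = the updated (pending, count, d) state
def segB (R1 R2 R3 b1 b2 b3 nxt : Int) (st : Int × Int × Int) : Sum Int (Int × Int × Int) :=
  let r := rateB R1 R2 R3 b1 b2 b3 st.2.2
  if r > 0 then
    if st.1 ≤ r * (nxt - st.2.2) then Sum.inl (st.2.1 + PySem.Int.floordiv st.1 r)
    else Sum.inr (st.1 - r * (nxt - st.2.2), st.2.1 + (nxt - st.2.2), nxt)
  else Sum.inr (st.1, st.2.1, nxt)

def get_days_of_power_alt (R1 : Int) (D1 : Int) (R2 : Int) (D2 : Int) (R3 : Int) (D3 : Int) (K : Int) : Int :=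
  if D1 + D2 + D3 = 0 then 0
  else if R1 < 0 ∨ R2 < 0 ∨ R3 < 0 ∨ D1 < 0 ∨ D2 < 0 ∨ D3 < 0 then -1
  else if K ≤ 0 then 0
  else
    let b1 := max D1 1
    let b2 := max D2 1
    let b3 := max D3 1
    let lo := min b1 (min b2 b3)
    let hi := max b1 (max b2 b3)
    let mid := b1 + b2 + b3 - lo - hi
    match segB R1 R2 R3 b1 b2 b3 mid (K, 0, lo) with
    | Sum.inl res => res
    | Sum.inr st =>
      match segB R1 R2 R3 b1 b2 b3 hi st with
      | Sum.inl res => res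
      | Sum.inr st2 => st2.2.1 + PySem.Int.floordiv st2.1 (rateB R1 R2 R3 b1 b2 b3 st2.2.2)

-- ===== PRECONDITION & SPEC =====
-- Pre_ excludes exactly the inputs on which A's while loop never terminates (demand K > 0
-- but all three rates are 0, after A's early-return guards); B raises ZeroDivisionError there.
def Pre_get_days_of_power (R1 : Int) (D1 : Int) (R2 : Int) (D2 : Int) (R3 : Int) (D3 : Int) (K : Int) : Prop :=
  ¬ (D1 + D2 + D3 ≠ 0 ∧ 0 ≤ R1 ∧ 0 ≤ R2 ∧ 0 ≤ R3 ∧ 0 ≤ D1 ∧ 0 ≤ D2 ∧ 0 ≤ D3 ∧ 0 < K ∧ R1 + R2 + R3 = 0)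
instance (R1 : Int) (D1 : Int) (R2 : Int) (D2 : Int) (R3 : Int) (D3 : Int) (K : Int) : Decidable (Pre_get_days_of_power R1 D1 R2 D2 R3 D3 K) := by unfold Pre_get_days_of_power; infer_instance

def pvWitness_get_days_of_power : Int × Int × Int × Int × Int × Int × Int := (2, 1, 3, 2, 1, 4, 17)

def Spec_get_days_of_power (R1 : Int) (D1 : Int) (R2 : Int) (D2 : Int) (R3 : Int) (D3 : Int) (K : Int) (out : Int) : Prop := out = get_days_of_power_alt R1 D1 R2 D2 R3 D3 K
instance (R1 : Int) (D1 : Int) (R2 : Int) (D2 : Int) (R3 : Int) (D3 : Int) (K : Int) (out : Int) : Decidable (Spec_get_days_of_power R1 D1 R2 D2 R3 D3 K out) := by unfold Spec_get_days_of_power; infer_instance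

-- ===== CLAIM (what is proved, stated in full; the proofs are below) =====
def Claim_equal_get_days_of_power : Prop := ∀ (R1 : Int) (D1 : Int) (R2 : Int) (D2 : Int) (R3 : Int) (D3 : Int) (K : Int), Dom_get_days_of_power R1 D1 R2 D2 R3 D3 K → Pre_get_days_of_power R1 D1 R2 D2 R3 D3 K → Spec_get_days_of_power R1 D1 R2 D2 R3 D3 K (get_days_of_power R1 D1 R2 D2 R3 D3 K)

-- ===== LEMMAS AND PROOFS =====

-- A's loop with the flag bookkeeping removed: the rate on day d is recomputed as rateB d
def spin (R1 R2 R3 b1 b2 b3 : Int) : Nat → Int → Int → Int → Int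
  | 0, _, _, count => count
  | (fuel+1), day, pending, count =>
    if pending > 0 then
      let r := rateB R1 R2 R3 b1 b2 b3 (day + 1)
      if r = 0 then spin R1 R2 R3 b1 b2 b3 fuel (day + 1) pending count
      else
        let p := pending - r
        spin R1 R2 R3 b1 b2 b3 fuel (day + 1) p (if p ≥ 0 then count + 1 else count)
    else count

theorem spin_stop (R1 R2 R3 b1 b2 b3 : Int) (fuel : Nat) (day p c : Int) (h : p ≤ 0) :
    spin R1 R2 R3 b1 b2 b3 fuel day p c = c := by
  cases fuel with
  | zero => rfl
  | succ n => rw [spin, if_neg (by omega)]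

theorem rateB_ext (R1 R2 R3 b1 b2 b3 s t : Int) (h1 : b1 ≤ t ↔ b1 ≤ s)
    (h2 : b2 ≤ t ↔ b2 ≤ s) (h3 : b3 ≤ t ↔ b3 ≤ s) :
    rateB R1 R2 R3 b1 b2 b3 t = rateB R1 R2 R3 b1 b2 b3 s := by
  simp only [rateB, h1, h2, h3]

theorem stepAdd_eq (D R X day : Int) (hday : 0 ≤ day) :
    stepAdd (D ≤ day + 1) R X (decide (max D 1 ≤ day)) =
      (X + ((if max D 1 ≤ day + 1 then R else 0) - (if max D 1 ≤ day then R else 0)),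
       decide (max D 1 ≤ day + 1)) := by
  unfold stepAdd
  by_cases h1 : max D 1 ≤ day <;> by_cases h2 : max D 1 ≤ day + 1 <;>
    simp [h1, h2] <;> omega

theorem flags_eq (D1 R1 D2 R2 D3 R3 : Int) :
    ∀ (fuel : Nat) (day p c : Int), 0 ≤ day →
      loopA D1 R1 D2 R2 D3 R3 fuel day p
        (rateB R1 R2 R3 (max D1 1) (max D2 1) (max D3 1) day) c
        (decide (max D1 1 ≤ day)) (decide (max D2 1 ≤ day)) (decide (max D3 1 ≤ day))
      = spin R1 R2 R3 (max D1 1) (max D2 1) (max D3 1) fuel day p c := by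
  intro fuel
  induction fuel with
  | zero => intro day p c _; rfl
  | succ n ih =>
    intro day p c hday
    simp only [loopA, spin]
    by_cases hp : p > 0
    · rw [if_pos hp, if_pos hp]
      rw [stepAdd_eq D1 R1 _ day hday, stepAdd_eq D2 R2 _ day hday, stepAdd_eq D3 R3 _ day hday]
      have htot :
          rateB R1 R2 R3 (max D1 1) (max D2 1) (max D3 1) day
            + ((if max D1 1 ≤ day + 1 then R1 else 0) - (if max D1 1 ≤ day then R1 else 0))
            + ((if max D2 1 ≤ day + 1 then R2 else 0) - (if max D2 1 ≤ day then R2 else 0))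
            + ((if max D3 1 ≤ day + 1 then R3 else 0) - (if max D3 1 ≤ day then R3 else 0))
          = rateB R1 R2 R3 (max D1 1) (max D2 1) (max D3 1) (day + 1) := by
        unfold rateB; ring
      simp only [htot]
      split_ifs <;> exact ih (day + 1) _ _ (by omega)
    · rw [if_neg hp, if_neg hp]

theorem spin_skip (R1 R2 R3 b1 b2 b3 : Int) :
    ∀ (n fuel : Nat) (day p c : Int),
      (∀ t : Int, day < t → t ≤ day + n → rateB R1 R2 R3 b1 b2 b3 t = 0) →
      spin R1 R2 R3 b1 b2 b3 (fuel + n) day p c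
        = spin R1 R2 R3 b1 b2 b3 fuel (day + n) p c := by
  intro n
  induction n with
  | zero => intro fuel day p c _; norm_num
  | succ m ih =>
    intro fuel day p c h
    by_cases hp : p > 0
    · show spin R1 R2 R3 b1 b2 b3 ((fuel + m) + 1) day p c = _
      rw [spin, if_pos hp, h (day + 1) (by omega) (by push_cast; omega), if_pos rfl]
      rw [ih fuel (day + 1) p c (fun t h1 h2 => h t (by omega) (by push_cast at h2 ⊢; omega))]
      congr 1
      push_cast; ring
    · rw [spin_stop _ _ _ _ _ _ _ _ _ _ (by omega), spin_stop _ _ _ _ _ _ _ _ _ _ (by omega)]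

theorem spin_survive (R1 R2 R3 b1 b2 b3 r : Int) :
    ∀ (n fuel : Nat) (day p c : Int), 0 < r →
      (∀ t : Int, day < t → t ≤ day + n → rateB R1 R2 R3 b1 b2 b3 t = r) →
      r * n < p →
      spin R1 R2 R3 b1 b2 b3 (fuel + n) day p c
        = spin R1 R2 R3 b1 b2 b3 fuel (day + n) (p - r * n) (c + n) := by
  intro n
  induction n with
  | zero => intro fuel day p c _ _ _; norm_num
  | succ m ih =>
    intro fuel day p c hr h hlt
    have hcast : ((m + 1 : Nat) : Int) = (m : Int) + 1 := by push_cast; ring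
    have hm : 0 ≤ r * (m : Int) := by positivity
    have hrm : r * ((m + 1 : Nat) : Int) = r * (m : Int) + r := by rw [hcast]; ring
    have hp : p > 0 := by omega
    show spin R1 R2 R3 b1 b2 b3 ((fuel + m) + 1) day p c = _
    simp only [spin]
    rw [if_pos hp, h (day + 1) (by omega) (by push_cast; omega)]
    rw [if_neg (by omega)]
    have hge : p - r ≥ 0 := by omega
    rw [if_pos hge]
    rw [ih fuel (day + 1) (p - r) (c + 1) hr
        (fun t h1 h2 => h t (by omega) (by push_cast at h2 ⊢; omega)) (by omega)]
    congr 1 <;> push_cast <;> ring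

theorem spin_deplete (R1 R2 R3 b1 b2 b3 r : Int) :
    ∀ (n fuel : Nat) (day p c : Int), 0 < r → 0 < p → p ≤ r * n → n ≤ fuel →
      (∀ t : Int, day < t → t ≤ day + n → rateB R1 R2 R3 b1 b2 b3 t = r) →
      spin R1 R2 R3 b1 b2 b3 fuel day p c = c + PySem.Int.floordiv p r := by
  intro n
  induction n with
  | zero => intro fuel day p c _ hp hpn _ _; norm_num at hpn; omega
  | succ m ih =>
    intro fuel day p c hr hp hpn hf h
    obtain ⟨f, rfl⟩ : ∃ f, fuel = f + 1 := ⟨fuel - 1, by omega⟩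
    simp only [spin]
    rw [if_pos (show p > 0 by omega), h (day + 1) (by omega) (by push_cast; omega)]
    rw [if_neg (by omega)]
    have hrm : r * ((m + 1 : Nat) : Int) = r * (m : Int) + r := by push_cast; ring
    by_cases hpr : p ≤ r
    · rw [spin_stop _ _ _ _ _ _ _ _ _ _ (by omega)]
      by_cases heq : p = r
      · have h1 : PySem.Int.floordiv p r = 1 := by
          rw [PySem.Int.floordiv_eq_iff_of_pos hr]; constructor <;> nlinarith
        rw [if_pos (by omega), h1]
      · have hlt : p < r := by omega
        have h0 : PySem.Int.floordiv p r = 0 := by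
          rw [PySem.Int.floordiv_eq_iff_of_pos hr]; constructor <;> nlinarith
        rw [if_neg (by omega), h0]; ring
    · rw [if_pos (by omega)]
      have hm0 : 0 ≤ r * (m : Int) := by positivity
      rw [ih f (day + 1) (p - r) (c + 1) hr (by omega) (by omega) (by omega)
          (fun t h1 h2 => h t (by omega) (by push_cast at h2 ⊢; omega))]
      have hq := (PySem.Int.floordiv_eq_iff_of_pos (a := p - r) hr).mp rfl
      have hfd : PySem.Int.floordiv p r = PySem.Int.floordiv (p - r) r + 1 := by
        rw [PySem.Int.floordiv_eq_iff_of_pos hr]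
        constructor <;> nlinarith [hq.1, hq.2]
      rw [hfd]; ring

theorem rateB_nonneg (R1 R2 R3 b1 b2 b3 d : Int) (h1 : 0 ≤ R1) (h2 : 0 ≤ R2) (h3 : 0 ≤ R3) :
    0 ≤ rateB R1 R2 R3 b1 b2 b3 d := by
  unfold rateB; split_ifs <;> omega

-- depleting the final (constant full-rate) tail plus segment 2, matching Source B's second
-- loop iteration and final return
theorem seg2_final (R1 R2 R3 b1 b2 b3 lo mid hi p2 c2 : Int) (f2 : Nat)
    (hR1 : 0 ≤ R1) (hR2 : 0 ≤ R2) (hR3 : 0 ≤ R3)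
    (hs : 0 < R1 + R2 + R3)
    (hlo : lo = min b1 (min b2 b3)) (hhi : hi = max b1 (max b2 b3))
    (hmid : mid = b1 + b2 + b3 - lo - hi)
    (hp2 : 0 < p2)
    (hf : (hi - mid).toNat + p2.toNat ≤ f2) :
    spin R1 R2 R3 b1 b2 b3 f2 (mid - 1) p2 c2 =
      match segB R1 R2 R3 b1 b2 b3 hi (p2, c2, mid) with
      | Sum.inl res => res
      | Sum.inr st2 => st2.2.1 + PySem.Int.floordiv st2.1 (rateB R1 R2 R3 b1 b2 b3 st2.2.2) := by
  have hcf : ∀ t : Int, hi - 1 < t → rateB R1 R2 R3 b1 b2 b3 t = R1 + R2 + R3 := by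
    intro t ht; unfold rateB
    rw [if_pos (by omega), if_pos (by omega), if_pos (by omega)]
  have hc2 : ∀ t : Int, mid - 1 < t → t ≤ hi - 1 →
      rateB R1 R2 R3 b1 b2 b3 t = rateB R1 R2 R3 b1 b2 b3 mid := by
    intro t h1 h2
    exact rateB_ext R1 R2 R3 b1 b2 b3 mid t (by omega) (by omega) (by omega)
  have hrhi : rateB R1 R2 R3 b1 b2 b3 hi = R1 + R2 + R3 := hcf hi (by omega)
  have hn2 : (((hi - mid).toNat : Nat) : Int) = hi - mid := by omega
  have final : ∀ (f3 : Nat) (p3 c3 : Int), 0 < p3 → p3.toNat ≤ f3 →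
      spin R1 R2 R3 b1 b2 b3 f3 (hi - 1) p3 c3 = c3 + PySem.Int.floordiv p3 (R1 + R2 + R3) := by
    intro f3 p3 c3 hp3 hf3
    exact spin_deplete R1 R2 R3 b1 b2 b3 (R1 + R2 + R3) p3.toNat f3 (hi - 1) p3 c3 hs hp3
      (by nlinarith [Int.toNat_of_nonneg (le_of_lt hp3)]) hf3 (fun t h1 _ => hcf t h1)
  by_cases hpos : rateB R1 R2 R3 b1 b2 b3 mid > 0
  · by_cases hdep : p2 ≤ rateB R1 R2 R3 b1 b2 b3 mid * (hi - mid)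
    · have hseg : segB R1 R2 R3 b1 b2 b3 hi (p2, c2, mid)
          = Sum.inl (c2 + PySem.Int.floordiv p2 (rateB R1 R2 R3 b1 b2 b3 mid)) := by
        simp [segB, hpos, hdep]
      rw [hseg]
      exact spin_deplete R1 R2 R3 b1 b2 b3 (rateB R1 R2 R3 b1 b2 b3 mid) (hi - mid).toNat f2
        (mid - 1) p2 c2 hpos hp2 (by rw [hn2]; exact hdep) (by omega)
        (fun t h1 h2 => hc2 t h1 (by rw [hn2] at h2; omega))
    · have hlt' : rateB R1 R2 R3 b1 b2 b3 mid * (hi - mid) < p2 := lt_of_not_ge hdep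
      have hnn : 0 ≤ rateB R1 R2 R3 b1 b2 b3 mid * (hi - mid) :=
        mul_nonneg (le_of_lt hpos) (by omega)
      have hseg : segB R1 R2 R3 b1 b2 b3 hi (p2, c2, mid)
          = Sum.inr (p2 - rateB R1 R2 R3 b1 b2 b3 mid * (hi - mid), c2 + (hi - mid), hi) := by
        simp [segB, hpos, hdep]
      rw [hseg]
      obtain ⟨f3, rfl⟩ : ∃ f3, f2 = f3 + (hi - mid).toNat := ⟨f2 - (hi - mid).toNat, by omega⟩
      rw [spin_survive R1 R2 R3 b1 b2 b3 (rateB R1 R2 R3 b1 b2 b3 mid) (hi - mid).toNat f3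
          (mid - 1) p2 c2 hpos (fun t h1 h2 => hc2 t h1 (by rw [hn2] at h2; omega))
          (by rw [hn2]; exact hlt')]
      rw [show (mid - 1) + (((hi - mid).toNat : Nat) : Int) = hi - 1 from by omega,
          show p2 - rateB R1 R2 R3 b1 b2 b3 mid * (((hi - mid).toNat : Nat) : Int)
              = p2 - rateB R1 R2 R3 b1 b2 b3 mid * (hi - mid) from by rw [hn2],
          show c2 + (((hi - mid).toNat : Nat) : Int) = c2 + (hi - mid) from by rw [hn2]]
      have hp3 : 0 < p2 - rateB R1 R2 R3 b1 b2 b3 mid * (hi - mid) := by omega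
      have hp3le : p2 - rateB R1 R2 R3 b1 b2 b3 mid * (hi - mid) ≤ p2 := by omega
      rw [final f3 _ _ hp3 (le_trans (Int.toNat_le_toNat hp3le) (by omega))]
      show _ = c2 + (hi - mid) + PySem.Int.floordiv
          (p2 - rateB R1 R2 R3 b1 b2 b3 mid * (hi - mid)) (rateB R1 R2 R3 b1 b2 b3 hi)
      rw [hrhi]
  · have hz : rateB R1 R2 R3 b1 b2 b3 mid = 0 := by
      have := rateB_nonneg R1 R2 R3 b1 b2 b3 mid hR1 hR2 hR3; omega
    have hseg : segB R1 R2 R3 b1 b2 b3 hi (p2, c2, mid) = Sum.inr (p2, c2, hi) := by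
      simp [segB, hz]
    rw [hseg]
    obtain ⟨f3, rfl⟩ : ∃ f3, f2 = f3 + (hi - mid).toNat := ⟨f2 - (hi - mid).toNat, by omega⟩
    rw [spin_skip R1 R2 R3 b1 b2 b3 (hi - mid).toNat f3 (mid - 1) p2 c2
        (fun t h1 h2 => (hc2 t h1 (by rw [hn2] at h2; omega)).trans hz)]
    rw [show (mid - 1) + (((hi - mid).toNat : Nat) : Int) = hi - 1 from by omega]
    rw [final f3 p2 c2 hp2 (by omega)]
    show _ = c2 + PySem.Int.floordiv p2 (rateB R1 R2 R3 b1 b2 b3 hi)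
    rw [hrhi]

-- the whole loop, from day 0, equals Source B's three-segment computation
theorem main_case (R1 R2 R3 b1 b2 b3 lo mid hi K : Int) (fuel : Nat)
    (hR1 : 0 ≤ R1) (hR2 : 0 ≤ R2) (hR3 : 0 ≤ R3)
    (hb1 : 1 ≤ b1) (hb2 : 1 ≤ b2) (hb3 : 1 ≤ b3)
    (hK : 0 < K) (hs : 0 < R1 + R2 + R3)
    (hlo : lo = min b1 (min b2 b3)) (hhi : hi = max b1 (max b2 b3))
    (hmid : mid = b1 + b2 + b3 - lo - hi)
    (hfuel : (hi - 1 + K).toNat ≤ fuel) :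
    spin R1 R2 R3 b1 b2 b3 fuel 0 K 0 =
      (match segB R1 R2 R3 b1 b2 b3 mid (K, 0, lo) with
       | Sum.inl res => res
       | Sum.inr st =>
         match segB R1 R2 R3 b1 b2 b3 hi st with
         | Sum.inl res => res
         | Sum.inr st2 => st2.2.1 + PySem.Int.floordiv st2.1 (rateB R1 R2 R3 b1 b2 b3 st2.2.2)) := by
  have hr0 : ∀ t : Int, 0 < t → t ≤ lo - 1 → rateB R1 R2 R3 b1 b2 b3 t = 0 := by
    intro t h1 h2; unfold rateB
    rw [if_neg (by omega), if_neg (by omega), if_neg (by omega)]; ring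
  have hc1 : ∀ t : Int, lo - 1 < t → t ≤ mid - 1 →
      rateB R1 R2 R3 b1 b2 b3 t = rateB R1 R2 R3 b1 b2 b3 lo := by
    intro t h1 h2
    exact rateB_ext R1 R2 R3 b1 b2 b3 lo t (by omega) (by omega) (by omega)
  have hn0 : (((lo - 1).toNat : Nat) : Int) = lo - 1 := by omega
  have hn1 : (((mid - lo).toNat : Nat) : Int) = mid - lo := by omega
  obtain ⟨f1, rfl⟩ : ∃ f1, fuel = f1 + (lo - 1).toNat := ⟨fuel - (lo - 1).toNat, by omega⟩
  rw [spin_skip R1 R2 R3 b1 b2 b3 (lo - 1).toNat f1 0 K 0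
      (fun t h1 h2 => hr0 t h1 (by rw [hn0] at h2; omega))]
  rw [show (0 : Int) + (((lo - 1).toNat : Nat) : Int) = lo - 1 from by omega]
  by_cases hpos : rateB R1 R2 R3 b1 b2 b3 lo > 0
  · by_cases hdep : K ≤ rateB R1 R2 R3 b1 b2 b3 lo * (mid - lo)
    · have hseg : segB R1 R2 R3 b1 b2 b3 mid (K, 0, lo)
          = Sum.inl (0 + PySem.Int.floordiv K (rateB R1 R2 R3 b1 b2 b3 lo)) := by
        simp [segB, hpos, hdep]
      rw [hseg]
      exact spin_deplete R1 R2 R3 b1 b2 b3 (rateB R1 R2 R3 b1 b2 b3 lo) (mid - lo).toNat f1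
        (lo - 1) K 0 hpos hK (by rw [hn1]; exact hdep) (by omega)
        (fun t h1 h2 => hc1 t h1 (by rw [hn1] at h2; omega))
    · have hlt' : rateB R1 R2 R3 b1 b2 b3 lo * (mid - lo) < K := lt_of_not_ge hdep
      have hnn : 0 ≤ rateB R1 R2 R3 b1 b2 b3 lo * (mid - lo) :=
        mul_nonneg (le_of_lt hpos) (by omega)
      have hseg : segB R1 R2 R3 b1 b2 b3 mid (K, 0, lo)
          = Sum.inr (K - rateB R1 R2 R3 b1 b2 b3 lo * (mid - lo), 0 + (mid - lo), mid) := by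
        simp [segB, hpos, hdep]
      rw [hseg]
      obtain ⟨f2, rfl⟩ : ∃ f2, f1 = f2 + (mid - lo).toNat := ⟨f1 - (mid - lo).toNat, by omega⟩
      rw [spin_survive R1 R2 R3 b1 b2 b3 (rateB R1 R2 R3 b1 b2 b3 lo) (mid - lo).toNat f2
          (lo - 1) K 0 hpos (fun t h1 h2 => hc1 t h1 (by rw [hn1] at h2; omega))
          (by rw [hn1]; exact hlt')]
      rw [show (lo - 1) + (((mid - lo).toNat : Nat) : Int) = mid - 1 from by omega,
          show K - rateB R1 R2 R3 b1 b2 b3 lo * (((mid - lo).toNat : Nat) : Int)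
              = K - rateB R1 R2 R3 b1 b2 b3 lo * (mid - lo) from by rw [hn1],
          show (0 : Int) + (((mid - lo).toNat : Nat) : Int) = 0 + (mid - lo) from by rw [hn1]]
      exact seg2_final R1 R2 R3 b1 b2 b3 lo mid hi
        (K - rateB R1 R2 R3 b1 b2 b3 lo * (mid - lo)) (0 + (mid - lo)) f2
        hR1 hR2 hR3 hs hlo hhi hmid (by omega)
        (le_trans (by
          have h1 : (K - rateB R1 R2 R3 b1 b2 b3 lo * (mid - lo)).toNat ≤ K.toNat :=
            Int.toNat_le_toNat (by omega)
          omega) (le_refl f2) |>.trans (by omega))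
  · have hz : rateB R1 R2 R3 b1 b2 b3 lo = 0 := by
      have := rateB_nonneg R1 R2 R3 b1 b2 b3 lo hR1 hR2 hR3; omega
    have hseg : segB R1 R2 R3 b1 b2 b3 mid (K, 0, lo) = Sum.inr (K, 0, mid) := by
      simp [segB, hz]
    rw [hseg]
    obtain ⟨f2, rfl⟩ : ∃ f2, f1 = f2 + (mid - lo).toNat := ⟨f1 - (mid - lo).toNat, by omega⟩
    rw [spin_skip R1 R2 R3 b1 b2 b3 (mid - lo).toNat f2 (lo - 1) K 0
        (fun t h1 h2 => (hc1 t h1 (by rw [hn1] at h2; omega)).trans hz)]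
    rw [show (lo - 1) + (((mid - lo).toNat : Nat) : Int) = mid - 1 from by omega]
    exact seg2_final R1 R2 R3 b1 b2 b3 lo mid hi K 0 f2
      hR1 hR2 hR3 hs hlo hhi hmid hK (by omega)

theorem loopA_nonpos (D1 R1 D2 R2 D3 R3 : Int) (fuel : Nat) (day p t c : Int)
    (a1 a2 a3 : Bool) (h : p ≤ 0) :
    loopA D1 R1 D2 R2 D3 R3 fuel day p t c a1 a2 a3 = c := by
  cases fuel with
  | zero => rfl
  | succ n => rw [loopA, if_neg (by omega)]

-- ===== VERDICT (by name: the statement is the Claim_ definition above) =====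
theorem get_days_of_power_spec : Claim_equal_get_days_of_power := by
  intro R1 D1 R2 D2 R3 D3 K _hdom hpre
  unfold Spec_get_days_of_power get_days_of_power get_days_of_power_alt
  by_cases h0 : D1 + D2 + D3 = 0
  · rw [if_pos h0, if_pos h0]
  rw [if_neg h0, if_neg h0]
  by_cases hnegR : R1 < 0 ∨ R2 < 0 ∨ R3 < 0
  · rw [if_pos hnegR, if_pos (by tauto)]
  rw [if_neg hnegR]
  by_cases hnegD : D1 < 0 ∨ D2 < 0 ∨ D3 < 0
  · rw [if_pos hnegD, if_pos (by tauto)]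
  rw [if_neg hnegD, if_neg (by tauto)]
  by_cases hK : K ≤ 0
  · rw [if_pos hK, loopA_nonpos _ _ _ _ _ _ _ _ _ _ _ _ _ _ hK]
  rw [if_neg hK]
  have hR1 : 0 ≤ R1 := by omega
  have hR2 : 0 ≤ R2 := by omega
  have hR3 : 0 ≤ R3 := by omega
  have hD1 : 0 ≤ D1 := by omega
  have hD2 : 0 ≤ D2 := by omega
  have hD3 : 0 ≤ D3 := by omega
  have hK' : 0 < K := by omega
  have hs : 0 < R1 + R2 + R3 := by
    by_contra hc
    exact hpre ⟨h0, hR1, hR2, hR3, hD1, hD2, hD3, hK', by omega⟩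
  have hr0' : rateB R1 R2 R3 (max D1 1) (max D2 1) (max D3 1) 0 = 0 := by
    unfold rateB
    rw [if_neg (by omega), if_neg (by omega), if_neg (by omega)]; ring
  have key := flags_eq D1 R1 D2 R2 D3 R3
    ((max D1 (max D2 (max D3 1)) + K).toNat + 1) 0 K 0 (le_refl 0)
  rw [hr0'] at key
  rw [show (decide ((max D1 1 : Int) ≤ 0)) = false from by
        rw [decide_eq_false_iff_not]; omega,
      show (decide ((max D2 1 : Int) ≤ 0)) = false from by
        rw [decide_eq_false_iff_not]; omega,
      show (decide ((max D3 1 : Int) ≤ 0)) = false from by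
        rw [decide_eq_false_iff_not]; omega] at key
  rw [key]
  exact main_case R1 R2 R3 (max D1 1) (max D2 1) (max D3 1)
    (min (max D1 1) (min (max D2 1) (max D3 1)))
    (max D1 1 + max D2 1 + max D3 1 - min (max D1 1) (min (max D2 1) (max D3 1))
      - max (max D1 1) (max (max D2 1) (max D3 1)))
    (max (max D1 1) (max (max D2 1) (max D3 1))) K
    ((max D1 (max D2 (max D3 1)) + K).toNat + 1)
    hR1 hR2 hR3
    (le_max_right D1 1) (le_max_right D2 1) (le_max_right D3 1)
    hK' hs rfl rfl rfl (by omega)
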